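-- pv_equiv track=rewrite | github.com/6reg/pc_func_fun | combos1.py | combos
-- ===== SOURCE A (Python) =====
-- def combos(l):
--     res = []
--     for i in range(len(l)-1):
--         for y in range(i+1, len(l)):
--             mini_lst = [l[i], l[y]]
--             if mini_lst not in res:
--                 res.append(mini_lst)
--     return res
-- ===== SOURCE B (Python) =====
-- def combos(l):
--     # For each value at its FIRST occurrence, pair it with the distinct values of
--     # the suffix after that position; later occurrences of the same first value
--     # contribute nothing new, so they are skipped entirely.
--     res = []
--     seen_first = set()
--     for i in range(len(l) - 1):
--         a = l[i]
--         if a in seen_first: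
--             continue
--         seen_first.add(a)
--         seen_second = set()
--         for b in l[i + 1:]:
--             if b not in seen_second:
--                 seen_second.add(b)
--                 res.append([a, b])
--     return res
-- ===== Notes on version B (the rewrite author's own statement) =====
-- stated objective: faster
-- what changed: B drops A's global 'pair not in res' scan of the result list entirely: it processes only the FIRST occurrence of each value as a left component (a seen_first set skips later duplicates) and pairs it with the distinct values of the suffix after it, tracked by a local per-row seen_second set, so no membership test on the growing result list remains.
import Mathlib
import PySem

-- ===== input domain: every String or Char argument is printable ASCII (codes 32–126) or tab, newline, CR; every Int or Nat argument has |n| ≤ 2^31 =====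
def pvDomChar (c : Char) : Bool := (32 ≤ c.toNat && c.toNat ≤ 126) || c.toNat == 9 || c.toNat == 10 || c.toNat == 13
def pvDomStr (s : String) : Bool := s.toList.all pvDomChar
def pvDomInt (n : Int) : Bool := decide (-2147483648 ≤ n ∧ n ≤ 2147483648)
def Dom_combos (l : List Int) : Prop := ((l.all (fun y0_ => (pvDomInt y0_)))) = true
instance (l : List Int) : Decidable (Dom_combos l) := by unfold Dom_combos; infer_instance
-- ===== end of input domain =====

-- B replaces A's global quadratic membership test on the result list by a value-level
-- argument: only the FIRST occurrence of each first component can contribute, and it is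
-- paired with the distinct values of the suffix after it (tracked by a local set).

-- ===== PORT A =====
def combos (l : List Int) : List (List Int) :=
  (PySem.List.pyRange 0 ((l.length : Int) - 1) 1).foldl (fun res i =>
    (PySem.List.pyRange (i + 1) (l.length : Int) 1).foldl (fun res y =>
      let mini_lst := [PySem.List.pyGetD l i 0, PySem.List.pyGetD l y 0]
      if mini_lst ∈ res then res else res ++ [mini_lst]) res) []

-- ===== PORT B =====
def combos_alt (l : List Int) : List (List Int) :=
  ((PySem.List.pyRange 0 ((l.length : Int) - 1) 1).foldl
    (fun (st : PySem.Set Int × List (List Int)) i =>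
      let a := PySem.List.pyGetD l i 0
      if PySem.Set.contains st.1 a then st
      else
        let st2 := (PySem.List.slice l (some (i + 1)) none).foldl
          (fun (p : PySem.Set Int × List (List Int)) b =>
            if PySem.Set.contains p.1 b then p
            else (PySem.Set.add p.1 b, p.2 ++ [[a, b]]))
          (PySem.Set.empty, st.2)
        (PySem.Set.add st.1 a, st2.2))
    (PySem.Set.empty, [])).2

-- ===== PRECONDITION & SPEC =====
def Spec_combos (l : List Int) (out : List (List Int)) : Prop := out = combos_alt l
instance (l : List Int) (out : List (List Int)) : Decidable (Spec_combos l out) := by unfold Spec_combos; infer_instance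

-- ===== CLAIM (what is proved, stated in full; the proofs are below) =====
def Claim_equal_combos : Prop := ∀ (l : List Int), Dom_combos l → Spec_combos l (combos l)

-- ===== LEMMAS AND PROOFS =====

-- A's inner-loop step and B's inner-loop step, named for the proofs
def stepA (a : Int) (r : List (List Int)) (b : Int) : List (List Int) :=
  if [a, b] ∈ r then r else r ++ [[a, b]]

def stepB (a : Int) (p : PySem.Set Int × List (List Int)) (b : Int) :
    PySem.Set Int × List (List Int) :=
  if PySem.Set.contains p.1 b then p else (PySem.Set.add p.1 b, p.2 ++ [[a, b]])

-- structural recursions equivalent to the two ports' index loops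
def goA : List Int → List (List Int) → List (List Int)
  | [], res => res
  | a :: rest, res => goA rest (rest.foldl (stepA a) res)

def goB : List Int → PySem.Set Int → List (List Int) → List (List Int)
  | [], _, res => res
  | a :: rest, seen, res =>
    if PySem.Set.contains seen a then goB rest seen res
    else goB rest (PySem.Set.add seen a)
      (rest.foldl (stepB a) (PySem.Set.empty, res)).2

theorem contains_iff {s : PySem.Set Int} {x : Int} :
    PySem.Set.contains s x = true ↔ x ∈ s := by
  simp [PySem.Set.contains]

-- shifting an index range by one
theorem foldl_pyRange_shift {γ : Type} (g : γ → Int → γ) (m b : Int) (init : γ) :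
    (PySem.List.pyRange (m + 1) (b + 1) 1).foldl g init
      = (PySem.List.pyRange m b 1).foldl (fun r y => g r (y + 1)) init := by
  rw [PySem.List.pyRange_one, PySem.List.pyRange_one]
  have h : b + 1 - (m + 1) = b - m := by ring
  rw [h, List.foldl_map, List.foldl_map]
  apply PySem.List.foldl_congr_mem
  intro acc x _
  congr 1
  ring

theorem pyGetD_cons_succ' (a : Int) (rest : List Int) {i : Int} (hi : 0 ≤ i) (d : Int) :
    PySem.List.pyGetD (a :: rest) (i + 1) d = PySem.List.pyGetD rest i d := by
  obtain ⟨n, rfl⟩ := Int.eq_ofNat_of_zero_le hi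
  simp [PySem.List.pyGetD, PySem.List.pyGet?_cons_succ]

-- A's port equals goA
theorem A_general : ∀ (l : List Int) (res : List (List Int)),
    (PySem.List.pyRange 0 ((l.length : Int) - 1) 1).foldl (fun res i =>
      (PySem.List.pyRange (i + 1) (l.length : Int) 1).foldl (fun res y =>
        let mini_lst := [PySem.List.pyGetD l i 0, PySem.List.pyGetD l y 0]
        if mini_lst ∈ res then res else res ++ [mini_lst]) res) res = goA l res := by
  intro l
  induction l with
  | nil =>
      intro res
      rw [PySem.List.pyRange_one_eq_nil (by norm_num)]
      rfl
  | cons a rest ih =>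
      intro res
      by_cases hr : rest = []
      · subst hr
        rw [show ((([a] : List Int).length : Int) - 1) = 0 by simp,
            PySem.List.pyRange_one_eq_nil (le_refl 0)]
        rfl
      · have hn0 : 0 < (rest.length : Int) := by
          have := List.length_pos_iff.mpr hr
          exact_mod_cast this
        have hlen : (((a :: rest).length : Int)) = (rest.length : Int) + 1 := by
          push_cast [List.length_cons]; ring
        rw [hlen]
        simp only [add_sub_cancel_right]
        rw [PySem.List.pyRange_one_cons hn0]
        simp only [List.foldl_cons, PySem.List.pyGetD_zero_cons]
        have h0 : (PySem.List.pyRange (0 + 1) ((rest.length : Int) + 1) 1).foldl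
            (fun r y =>
              if [a, PySem.List.pyGetD (a :: rest) y 0] ∈ r then r
              else r ++ [[a, PySem.List.pyGetD (a :: rest) y 0]]) res
            = rest.foldl (stepA a) res := by
          rw [show (0 : Int) + 1 = 1 from by ring, ← hlen]
          have := PySem.List.foldl_pyRange_pyGetD' (a :: rest) 0
            (fun r v => if [a, v] ∈ r then r else r ++ [[a, v]]) res (a := 1) (by norm_num)
          simpa [stepA] using this
        rw [h0]
        have hshift : ∀ init : List (List Int),
            (PySem.List.pyRange (0 + 1) ((rest.length : Int)) 1).foldl
              (fun r i => (PySem.List.pyRange (i + 1) ((rest.length : Int) + 1) 1).foldl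
                (fun r y =>
                  if [PySem.List.pyGetD (a :: rest) i 0, PySem.List.pyGetD (a :: rest) y 0] ∈ r then r
                  else r ++ [[PySem.List.pyGetD (a :: rest) i 0, PySem.List.pyGetD (a :: rest) y 0]]) r) init
            = (PySem.List.pyRange 0 ((rest.length : Int) - 1) 1).foldl
              (fun r i => (PySem.List.pyRange ((i + 1) + 1) ((rest.length : Int) + 1) 1).foldl
                (fun r y =>
                  if [PySem.List.pyGetD (a :: rest) (i + 1) 0, PySem.List.pyGetD (a :: rest) y 0] ∈ r then r
                  else r ++ [[PySem.List.pyGetD (a :: rest) (i + 1) 0, PySem.List.pyGetD (a :: rest) y 0]]) r) init := by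
          intro init
          have := foldl_pyRange_shift
            (fun r i => (PySem.List.pyRange (i + 1) ((rest.length : Int) + 1) 1).foldl
              (fun r y =>
                if [PySem.List.pyGetD (a :: rest) i 0, PySem.List.pyGetD (a :: rest) y 0] ∈ r then r
                else r ++ [[PySem.List.pyGetD (a :: rest) i 0, PySem.List.pyGetD (a :: rest) y 0]]) r)
            0 ((rest.length : Int) - 1) init
          simpa using this
        rw [hshift]
        have hcong : ∀ init : List (List Int),
            (PySem.List.pyRange 0 ((rest.length : Int) - 1) 1).foldl
              (fun r i => (PySem.List.pyRange ((i + 1) + 1) ((rest.length : Int) + 1) 1).foldl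
                (fun r y =>
                  if [PySem.List.pyGetD (a :: rest) (i + 1) 0, PySem.List.pyGetD (a :: rest) y 0] ∈ r then r
                  else r ++ [[PySem.List.pyGetD (a :: rest) (i + 1) 0, PySem.List.pyGetD (a :: rest) y 0]]) r) init
            = (PySem.List.pyRange 0 ((rest.length : Int) - 1) 1).foldl
              (fun r i => (PySem.List.pyRange (i + 1) ((rest.length : Int)) 1).foldl
                (fun r y =>
                  if [PySem.List.pyGetD rest i 0, PySem.List.pyGetD rest y 0] ∈ r then r
                  else r ++ [[PySem.List.pyGetD rest i 0, PySem.List.pyGetD rest y 0]]) r) init := by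
          intro init
          apply PySem.List.foldl_congr_mem
          intro r i hi
          have hi0 : 0 ≤ i := ((PySem.List.mem_pyRange_one).mp hi).1
          rw [pyGetD_cons_succ' a rest hi0 0]
          have hsh := foldl_pyRange_shift
            (fun r y =>
              if [PySem.List.pyGetD rest i 0, PySem.List.pyGetD (a :: rest) y 0] ∈ r then r
              else r ++ [[PySem.List.pyGetD rest i 0, PySem.List.pyGetD (a :: rest) y 0]])
            (i + 1) ((rest.length : Int)) r
          rw [hsh]
          apply PySem.List.foldl_congr_mem
          intro r2 y hy
          have hy0 : 0 ≤ y := le_trans (by omega) ((PySem.List.mem_pyRange_one).mp hy).1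
          rw [pyGetD_cons_succ' a rest hy0 0]
        rw [hcong]
        exact ih (rest.foldl (stepA a) res)


-- B's port equals goB
theorem B_general : ∀ (l : List Int) (seen : PySem.Set Int) (res : List (List Int)),
    ((PySem.List.pyRange 0 ((l.length : Int) - 1) 1).foldl
      (fun (st : PySem.Set Int × List (List Int)) i =>
        let a := PySem.List.pyGetD l i 0
        if PySem.Set.contains st.1 a then st
        else
          let st2 := (PySem.List.slice l (some (i + 1)) none).foldl
            (fun (p : PySem.Set Int × List (List Int)) b =>
              if PySem.Set.contains p.1 b then p
              else (PySem.Set.add p.1 b, p.2 ++ [[a, b]]))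
            (PySem.Set.empty, st.2)
          (PySem.Set.add st.1 a, st2.2))
      (seen, res)).2 = goB l seen res := by
  intro l
  induction l with
  | nil =>
      intro seen res
      rw [PySem.List.pyRange_one_eq_nil (by norm_num)]
      rfl
  | cons a rest ih =>
      intro seen res
      by_cases hr : rest = []
      · subst hr
        rw [show ((([a] : List Int).length : Int) - 1) = 0 by simp,
            PySem.List.pyRange_one_eq_nil (le_refl 0)]
        simp [goB]
      · have hn0 : 0 < (rest.length : Int) := by
          have := List.length_pos_iff.mpr hr
          exact_mod_cast this
        have hlen : (((a :: rest).length : Int)) = (rest.length : Int) + 1 := by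
          push_cast [List.length_cons]; ring
        rw [hlen]
        simp only [add_sub_cancel_right]
        rw [PySem.List.pyRange_one_cons hn0]
        simp only [List.foldl_cons, PySem.List.pyGetD_zero_cons]
        have hsl : PySem.List.slice (a :: rest) (some (0 + 1)) none = rest := by
          rw [PySem.List.slice_from (a :: rest) (by norm_num)]
          simp
        rw [hsl]
        have hshift : ∀ init : PySem.Set Int × List (List Int),
            (PySem.List.pyRange (0 + 1) ((rest.length : Int)) 1).foldl
              (fun (st : PySem.Set Int × List (List Int)) i =>
                if PySem.Set.contains st.1 (PySem.List.pyGetD (a :: rest) i 0) then st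
                else
                  (PySem.Set.add st.1 (PySem.List.pyGetD (a :: rest) i 0),
                    ((PySem.List.slice (a :: rest) (some (i + 1)) none).foldl
                      (fun (p : PySem.Set Int × List (List Int)) b =>
                        if PySem.Set.contains p.1 b then p
                        else (PySem.Set.add p.1 b, p.2 ++ [[PySem.List.pyGetD (a :: rest) i 0, b]]))
                      (PySem.Set.empty, st.2)).2)) init
            = (PySem.List.pyRange 0 ((rest.length : Int) - 1) 1).foldl
              (fun (st : PySem.Set Int × List (List Int)) i =>
                if PySem.Set.contains st.1 (PySem.List.pyGetD (a :: rest) (i + 1) 0) then st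
                else
                  (PySem.Set.add st.1 (PySem.List.pyGetD (a :: rest) (i + 1) 0),
                    ((PySem.List.slice (a :: rest) (some ((i + 1) + 1)) none).foldl
                      (fun (p : PySem.Set Int × List (List Int)) b =>
                        if PySem.Set.contains p.1 b then p
                        else (PySem.Set.add p.1 b, p.2 ++ [[PySem.List.pyGetD (a :: rest) (i + 1) 0, b]]))
                      (PySem.Set.empty, st.2)).2)) init := by
          intro init
          have := foldl_pyRange_shift
            (fun (st : PySem.Set Int × List (List Int)) i =>
              if PySem.Set.contains st.1 (PySem.List.pyGetD (a :: rest) i 0) then st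
              else
                (PySem.Set.add st.1 (PySem.List.pyGetD (a :: rest) i 0),
                  ((PySem.List.slice (a :: rest) (some (i + 1)) none).foldl
                    (fun (p : PySem.Set Int × List (List Int)) b =>
                      if PySem.Set.contains p.1 b then p
                      else (PySem.Set.add p.1 b, p.2 ++ [[PySem.List.pyGetD (a :: rest) i 0, b]]))
                    (PySem.Set.empty, st.2)).2))
            0 ((rest.length : Int) - 1) init
          simpa using this
        rw [hshift]
        have hcong : ∀ init : PySem.Set Int × List (List Int),
            (PySem.List.pyRange 0 ((rest.length : Int) - 1) 1).foldl
              (fun (st : PySem.Set Int × List (List Int)) i =>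
                if PySem.Set.contains st.1 (PySem.List.pyGetD (a :: rest) (i + 1) 0) then st
                else
                  (PySem.Set.add st.1 (PySem.List.pyGetD (a :: rest) (i + 1) 0),
                    ((PySem.List.slice (a :: rest) (some ((i + 1) + 1)) none).foldl
                      (fun (p : PySem.Set Int × List (List Int)) b =>
                        if PySem.Set.contains p.1 b then p
                        else (PySem.Set.add p.1 b, p.2 ++ [[PySem.List.pyGetD (a :: rest) (i + 1) 0, b]]))
                      (PySem.Set.empty, st.2)).2)) init
            = (PySem.List.pyRange 0 ((rest.length : Int) - 1) 1).foldl
              (fun (st : PySem.Set Int × List (List Int)) i =>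
                if PySem.Set.contains st.1 (PySem.List.pyGetD rest i 0) then st
                else
                  (PySem.Set.add st.1 (PySem.List.pyGetD rest i 0),
                    ((PySem.List.slice rest (some (i + 1)) none).foldl
                      (fun (p : PySem.Set Int × List (List Int)) b =>
                        if PySem.Set.contains p.1 b then p
                        else (PySem.Set.add p.1 b, p.2 ++ [[PySem.List.pyGetD rest i 0, b]]))
                      (PySem.Set.empty, st.2)).2)) init := by
          intro init
          apply PySem.List.foldl_congr_mem
          intro st i hi
          have hi0 : 0 ≤ i := ((PySem.List.mem_pyRange_one).mp hi).1
          rw [pyGetD_cons_succ' a rest hi0 0]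
          have hsl2 : PySem.List.slice (a :: rest) (some ((i + 1) + 1)) none
              = PySem.List.slice rest (some (i + 1)) none := by
            rw [PySem.List.slice_from (a :: rest) (by omega), PySem.List.slice_from rest (by omega)]
            have ht : ((i + 1) + 1).toNat = (i + 1).toNat + 1 := by omega
            rw [ht, List.drop_succ_cons]
          rw [hsl2]
        rw [hcong]
        by_cases hc : PySem.Set.contains seen a = true
        · rw [if_pos hc]
          simp only [goB, if_pos hc]
          exact ih seen res
        · rw [if_neg hc]
          simp only [goB, if_neg hc]
          exact ih (PySem.Set.add seen a) _

-- if every pair with first component a is already present, A's inner loop is a no-op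
theorem foldA_noop (a : Int) : ∀ (xs : List Int) (res : List (List Int)),
    (∀ b ∈ xs, [a, b] ∈ res) → xs.foldl (stepA a) res = res := by
  intro xs
  induction xs with
  | nil => intro res _; rfl
  | cons b xs ih =>
      intro res h
      have hb : [a, b] ∈ res := h b (by simp)
      simp only [List.foldl_cons, stepA, if_pos hb]
      exact ih res (fun b' hb' => h b' (by simp [hb']))

-- A's inner loop equals the second component of B's inner loop when the local set
-- mirrors exactly the pairs with first component a already in res
theorem innerAB (a : Int) : ∀ (xs : List Int) (s : PySem.Set Int) (res : List (List Int)),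
    (∀ b : Int, [a, b] ∈ res ↔ PySem.Set.contains s b = true) →
    xs.foldl (stepA a) res = (xs.foldl (stepB a) (s, res)).2 := by
  intro xs
  induction xs with
  | nil => intro s res _; rfl
  | cons b xs ih =>
      intro s res hinv
      simp only [List.foldl_cons, stepA, stepB]
      by_cases hb : PySem.Set.contains s b = true
      · rw [if_pos ((hinv b).mpr hb), if_pos hb]
        exact ih s res hinv
      · have hnb : [a, b] ∉ res := fun hmem => hb ((hinv b).mp hmem)
        rw [if_neg hnb, if_neg hb]
        apply ih
        intro b'
        constructor
        · intro hmem
          rcases List.mem_append.mp hmem with h1 | h1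
          · exact contains_iff.mpr (PySem.Set.mem_add s b b' |>.mpr (Or.inl (contains_iff.mp ((hinv b').mp h1))))
          · have : b' = b := by simpa using h1
            exact contains_iff.mpr ((PySem.Set.mem_add s b b').mpr (Or.inr this))
        · intro hc
          rcases (PySem.Set.mem_add s b b').mp (contains_iff.mp hc) with h1 | h1
          · exact List.mem_append.mpr (Or.inl ((hinv b').mpr (contains_iff.mpr h1)))
          · simp [h1]

-- invariants of B's inner loop
theorem innerB_inv (a : Int) : ∀ (xs : List Int) (s : PySem.Set Int) (res : List (List Int)),
    (∀ b : Int, [a, b] ∈ res ↔ PySem.Set.contains s b = true) →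
    (∀ p ∈ (xs.foldl (stepB a) (s, res)).2, p ∈ res ∨ ∃ b : Int, p = [a, b])
    ∧ (∀ b ∈ xs, [a, b] ∈ (xs.foldl (stepB a) (s, res)).2)
    ∧ (∀ p ∈ res, p ∈ (xs.foldl (stepB a) (s, res)).2) := by
  intro xs
  induction xs with
  | nil =>
      intro s res _
      exact ⟨fun p hp => Or.inl hp, fun b hb => absurd hb (List.not_mem_nil), fun p hp => hp⟩
  | cons b xs ih =>
      intro s res hinv
      simp only [List.foldl_cons, stepB]
      by_cases hb : PySem.Set.contains s b = true
      · rw [if_pos hb]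
        obtain ⟨h1, h2, h3⟩ := ih s res hinv
        refine ⟨h1, ?_, h3⟩
        intro b' hb'
        rcases List.mem_cons.mp hb' with rfl | hb'
        · exact h3 _ ((hinv b').mpr hb)
        · exact h2 b' hb'
      · rw [if_neg hb]
        have hinv' : ∀ b' : Int, [a, b'] ∈ res ++ [[a, b]] ↔
            PySem.Set.contains (PySem.Set.add s b) b' = true := by
          intro b'
          constructor
          · intro hmem
            rcases List.mem_append.mp hmem with h1 | h1
            · exact contains_iff.mpr ((PySem.Set.mem_add s b b').mpr (Or.inl (contains_iff.mp ((hinv b').mp h1))))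
            · have : b' = b := by simpa using h1
              exact contains_iff.mpr ((PySem.Set.mem_add s b b').mpr (Or.inr this))
          · intro hc
            rcases (PySem.Set.mem_add s b b').mp (contains_iff.mp hc) with h1 | h1
            · exact List.mem_append.mpr (Or.inl ((hinv b').mpr (contains_iff.mpr h1)))
            · simp [h1]
        obtain ⟨h1, h2, h3⟩ := ih (PySem.Set.add s b) (res ++ [[a, b]]) hinv'
        refine ⟨?_, ?_, ?_⟩
        · intro p hp
          rcases h1 p hp with hp1 | hp1
          · rcases List.mem_append.mp hp1 with h4 | h4
            · exact Or.inl h4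
            · exact Or.inr ⟨b, by simpa using h4⟩
          · exact Or.inr hp1
        · intro b' hb'
          rcases List.mem_cons.mp hb' with rfl | hb'
          · exact h3 _ (List.mem_append.mpr (Or.inr (by simp)))
          · exact h2 b' hb'
        · intro p hp
          exact h3 p (List.mem_append.mpr (Or.inl hp))

theorem goA_eq_goB : ∀ (l : List Int) (seen : PySem.Set Int) (res : List (List Int)),
    (∀ x b : Int, x ∈ seen → b ∈ l → [x, b] ∈ res) →
    (∀ x b : Int, [x, b] ∈ res → x ∈ seen) →
    goA l res = goB l seen res := by
  intro l
  induction l with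
  | nil => intro seen res _ _; rfl
  | cons a rest ih =>
      intro seen res h1 h2
      simp only [goA, goB]
      by_cases ha : PySem.Set.contains seen a = true
      · rw [if_pos ha]
        have hnoop : rest.foldl (stepA a) res = res :=
          foldA_noop a rest res (fun b hb =>
            h1 a b (contains_iff.mp ha) (List.mem_cons_of_mem _ hb))
        rw [hnoop]
        exact ih seen res
          (fun x b hx hb => h1 x b hx (List.mem_cons_of_mem _ hb)) h2
      · rw [if_neg ha]
        have hfresh : ∀ b : Int, [a, b] ∈ res ↔
            PySem.Set.contains (PySem.Set.empty : PySem.Set Int) b = true := by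
          intro b
          constructor
          · intro hmem
            exact absurd (h2 a b hmem) (fun hx => ha (contains_iff.mpr hx))
          · intro hc
            exact absurd (contains_iff.mp hc) (List.not_mem_nil)
        rw [innerAB a rest PySem.Set.empty res hfresh]
        obtain ⟨p1, p2, p3⟩ := innerB_inv a rest PySem.Set.empty res hfresh
        apply ih
        · intro x b hx hb
          rcases (PySem.Set.mem_add seen a x).mp hx with hx1 | rfl
          · exact p3 _ (h1 x b hx1 (List.mem_cons_of_mem _ hb))
          · exact p2 b hb
        · intro x b hmem
          rcases p1 _ hmem with hp | ⟨b', hb'⟩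
          · exact (PySem.Set.mem_add seen a x).mpr (Or.inl (h2 x b hp))
          · have : x = a := by simpa using congrArg (fun t => t.headD 0) hb'
            exact (PySem.Set.mem_add seen a x).mpr (Or.inr this)

-- ===== VERDICT (by name: the statement is the Claim_ definition above) =====
theorem combos_spec : Claim_equal_combos := by
  intro l _
  unfold Spec_combos combos combos_alt
  rw [A_general, B_general]
  exact goA_eq_goB l PySem.Set.empty [] (by intro x b hx; cases hx) (by intro x b h; cases h)
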